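-- pv_equiv track=rewrite | github.com/Tradeupexchange/TradeUp-Computer-Vision | src/utils.py | clean_product_name
-- ===== SOURCE A (Python) =====
-- def get_safe_filename(filename: str) -> str:
--     """
--     Create a safe filename by removing/replacing problematic characters.
--
--     Args:
--         filename: Original filename
--
--     Returns:
--         Safe filename for filesystem
--     """
--     # Replace problematic characters
--     safe_chars = "abcdefghijklmnopqrstuvwxyzABCDEFGHIJKLMNOPQRSTUVWXYZ0123456789.-_"
--     safe_filename = "".join(c if c in safe_chars else "_" for c in filename)
--
--     # Remove multiple consecutive underscores
--     while "__" in safe_filename: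
--         safe_filename = safe_filename.replace("__", "_")
--
--     # Remove leading/trailing underscores
--     safe_filename = safe_filename.strip("_")
--
--     return safe_filename
--
-- def clean_product_name(title: str) -> str:
--     """
--     Clean and format product name for file naming.
--
--     Args:
--         title: Raw product title from SerpAPI
--
--     Returns:
--         Cleaned product name suitable for file naming
--     """
--     # Remove common noise words and characters
--     noise_words = ["buy", "shop", "online", "free shipping", "best price", "sale"]
--
--     # Clean the title
--     cleaned = title.lower()
--
--     # Remove noise words
--     for word in noise_words:
--         cleaned = cleaned.replace(word, "")
--
--     # Remove extra whitespace and special characters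
--     cleaned = " ".join(cleaned.split())  # Normalize whitespace
--
--     # Truncate if too long
--     if len(cleaned) > 50:
--         cleaned = cleaned[:50].strip()
--
--     # Make safe for filenames
--     safe_name = get_safe_filename(cleaned)
--
--     return safe_name or "unknown_product"
-- ===== SOURCE B (Python) =====
-- def clean_product_name(title: str) -> str:
--     noise_words = ["buy", "shop", "online", "free shipping", "best price", "sale"]
--     cleaned = title.lower()
--     for word in noise_words:
--         cleaned = cleaned.replace(word, "")
--     cleaned = " ".join(cleaned.split())
--     if len(cleaned) > 50:
--         cleaned = cleaned[:50].strip()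
--     # single left-to-right pass: map unsafe chars to '_' and collapse
--     # underscore runs on the fly instead of map-then-while-replace
--     safe_chars = set("abcdefghijklmnopqrstuvwxyzABCDEFGHIJKLMNOPQRSTUVWXYZ0123456789.-_")
--     out = []
--     prev_us = False
--     for c in cleaned:
--         d = c if c in safe_chars else "_"
--         if d == "_":
--             if not prev_us:
--                 out.append("_")
--                 prev_us = True
--         else:
--             out.append(d)
--             prev_us = False
--     name = "".join(out).strip("_")
--     return name or "unknown_product"
-- ===== Notes on version B (the rewrite author's own statement) =====
-- stated objective: alternative
-- what changed: The safe-filename step (map every unsafe char to '_' then repeatedly replace '__' by '_' until none remains) is replaced by a single left-to-right pass that maps each char and collapses underscore runs on the fly via a prev-was-underscore flag; noise-word removal, whitespace normalization and truncation are kept as in A.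
import Mathlib
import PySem

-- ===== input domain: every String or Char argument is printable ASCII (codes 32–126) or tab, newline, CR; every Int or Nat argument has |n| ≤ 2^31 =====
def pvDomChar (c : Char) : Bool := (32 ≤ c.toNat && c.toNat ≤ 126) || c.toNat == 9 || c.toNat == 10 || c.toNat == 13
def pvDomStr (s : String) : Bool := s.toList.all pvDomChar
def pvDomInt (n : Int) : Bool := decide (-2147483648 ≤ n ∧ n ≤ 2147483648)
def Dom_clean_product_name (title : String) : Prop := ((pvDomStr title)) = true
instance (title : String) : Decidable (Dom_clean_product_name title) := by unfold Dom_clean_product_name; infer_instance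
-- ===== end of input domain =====

-- B replaces A's map-then-while-replace safe-filename step by one left-to-right pass that
-- collapses underscore runs on the fly (objective: alternative decomposition, same cost).

-- ===== PORT A =====
-- helpers for A's while-loop termination: one pass of s.replace("__", "_") characterised as pvRep1
def pvRep1 : List Char → List Char
  | '_' :: '_' :: t => '_' :: pvRep1 t
  | c :: t => c :: pvRep1 t
  | [] => []

theorem pvRep1_len_le (t : List Char) : (pvRep1 t).length ≤ t.length := by
  induction t using pvRep1.induct <;> simp [pvRep1] <;> omega

theorem pvRep1_len_lt (s : List Char) (h : ['_', '_'] <:+: s) : (pvRep1 s).length < s.length := by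
  induction s using pvRep1.induct with
  | case1 t ih =>
    have := pvRep1_len_le t
    simp [pvRep1]; omega
  | case2 c t hne ih =>
    rcases List.infix_cons_iff.mp h with hp | hi
    · exfalso
      rcases hp with ⟨r, hr⟩
      cases t with
      | nil => simp at hr
      | cons b t' =>
        injection hr with h1 h2
        injection h2 with h3 _
        exact hne t' h1.symm (by rw [h3])
    · have := ih hi
      have h2 : pvRep1 (c :: t) = c :: pvRep1 t := by
        rw [pvRep1.eq_def]
        split
        · rename_i t1 heq; exfalso; injection heq with e1 e2; exact hne t1 e1 e2
        · rename_i heq; injection heq with e1 e2; rw [e1, e2]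
        · simp_all
      simp [h2]; omega
  | case3 =>
    exfalso
    rcases h with ⟨p, q, hpq⟩
    have := congrArg List.length hpq
    simp at this

theorem pvGo (fuel : Nat) : ∀ (l acc : List Char), l.length ≤ fuel →
    PySem.Chars.replace.go ['_', '_'] ['_'] fuel l acc = acc.reverse ++ pvRep1 l := by
  induction fuel with
  | zero =>
    intro l acc hl
    have : l = [] := List.length_eq_zero_iff.mp (Nat.le_zero.mp hl)
    subst this
    simp [PySem.Chars.replace.go, pvRep1]
  | succ n ih =>
    intro l acc hl
    cases l with
    | nil => simp [PySem.Chars.replace.go, pvRep1]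
    | cons c t =>
      rw [PySem.Chars.replace.go]
      by_cases hp : List.isPrefixOf ['_', '_'] (c :: t) = true
      · simp only [hp, if_true]
        obtain ⟨t2, ht⟩ : ∃ t2, c :: t = '_' :: '_' :: t2 := by
          cases t with
          | nil => simp [List.isPrefixOf] at hp
          | cons b t2 =>
            simp [List.isPrefixOf] at hp
            exact ⟨t2, by rw [← hp.1, ← hp.2]⟩
        rw [ht]
        have h2 := ih t2 ('_' :: acc) (by have := congrArg List.length ht; simp at this hl ⊢; omega)
        show PySem.Chars.replace.go ['_', '_'] ['_'] n t2 ('_' :: acc) = acc.reverse ++ pvRep1 ('_'::'_'::t2)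
        rw [show pvRep1 ('_'::'_'::t2) = '_' :: pvRep1 t2 from by rw [pvRep1], h2]
        simp
      · simp only [hp, Bool.false_eq_true, if_false]
        have hne : ∀ t1, c = '_' → t = '_' :: t1 → False := by
          intro t1 e1 e2
          subst e1; subst e2
          simp [List.isPrefixOf] at hp
        have h3 : pvRep1 (c :: t) = c :: pvRep1 t := by
          rw [pvRep1.eq_def]
          split
          · rename_i t1 heq; exfalso; injection heq with e1 e2; exact hne t1 e1 e2
          · rename_i heq; injection heq with e1 e2; rw [e1, e2]
          · simp_all
        rw [h3, ih t (c :: acc) (by simp at hl; omega)]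
        simp

theorem pvReplace_eq_rep1 (s : List Char) : PySem.Chars.replace s ['_', '_'] ['_'] = pvRep1 s := by
  rw [PySem.Chars.replace]
  simp only [List.isEmpty_cons, Bool.false_eq_true, if_false]
  simpa using pvGo s.length s [] le_rfl

theorem pvReplace_str_lt (s : String) (h : PySem.Str.isIn "__" s = true) :
    (PySem.Str.replace s "__" "_").toList.length < s.toList.length := by
  have hb : (PySem.Str.replace s "__" "_").toList = PySem.Chars.replace s.toList "__".toList "_".toList := by
    simp [PySem.Str.toList_replace]
  rw [hb]
  have h2 : ("__" : String).toList = ['_', '_'] := by decide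
  have h3 : ("_" : String).toList = ['_'] := by decide
  rw [h2, h3, pvReplace_eq_rep1]
  refine pvRep1_len_lt s.toList ?_
  have := (PySem.Str.isIn_iff_infix (sub := "__") (s := s)).mp h
  simpa using this

-- A's while loop: while "__" in s: s = s.replace("__", "_")
def pvCollapse (s : String) : String :=
  if _h : PySem.Str.isIn "__" s = true then pvCollapse (PySem.Str.replace s "__" "_") else s
termination_by s.toList.length
decreasing_by exact pvReplace_str_lt s _h

def pvSafeStr : String := "abcdefghijklmnopqrstuvwxyzABCDEFGHIJKLMNOPQRSTUVWXYZ0123456789.-_"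

def pvGetSafeFilename (filename : String) : String :=
  let safe := PySem.Str.join "" (filename.toList.map (fun c => if pvSafeStr.toList.contains c then String.ofList [c] else "_"))
  let collapsed := pvCollapse safe
  PySem.Str.stripChars collapsed "_"

def clean_product_name (title : String) : String :=
  let cleaned := PySem.Str.lower title
  let cleaned := ["buy", "shop", "online", "free shipping", "best price", "sale"].foldl
    (fun s w => PySem.Str.replace s w "") cleaned
  let cleaned := PySem.Str.join " " (PySem.Str.split₀ cleaned)
  let cleaned := if PySem.Str.len cleaned > 50 then PySem.Str.strip (PySem.Str.slice cleaned none (some 50)) else cleaned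
  let safe_name := pvGetSafeFilename cleaned
  if safe_name = "" then "unknown_product" else safe_name

-- ===== PORT B =====
def pvSafeSet : PySem.Set Char := PySem.Set.ofList "abcdefghijklmnopqrstuvwxyzABCDEFGHIJKLMNOPQRSTUVWXYZ0123456789.-_".toList

-- the single pass of Source B: map each char to itself-or-'_' and drop an '_' after an emitted '_'
def pvBLoop : List Char → Bool → List Char
  | [], _ => []
  | c :: t, prev =>
    let d := if pvSafeSet.contains c then c else '_'
    if d = '_' then (if prev then pvBLoop t true else '_' :: pvBLoop t true)
    else d :: pvBLoop t false

def clean_product_name_alt (title : String) : String :=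
  let cleaned := PySem.Str.lower title
  let cleaned := ["buy", "shop", "online", "free shipping", "best price", "sale"].foldl
    (fun s w => PySem.Str.replace s w "") cleaned
  let cleaned := PySem.Str.join " " (PySem.Str.split₀ cleaned)
  let cleaned := if PySem.Str.len cleaned > 50 then PySem.Str.strip (PySem.Str.slice cleaned none (some 50)) else cleaned
  let name := PySem.Str.stripChars (String.ofList (pvBLoop cleaned.toList false)) "_"
  if name = "" then "unknown_product" else name

-- ===== PRECONDITION & SPEC =====
def Spec_clean_product_name (title : String) (out : String) : Prop := out = clean_product_name_alt title
instance (title : String) (out : String) : Decidable (Spec_clean_product_name title out) := by unfold Spec_clean_product_name; infer_instance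

-- ===== CLAIM (what is proved, stated in full; the proofs are below) =====
def Claim_equal_clean_product_name : Prop := ∀ (title : String), Dom_clean_product_name title → Spec_clean_product_name title (clean_product_name title)

-- ===== LEMMAS AND PROOFS =====

-- canonical collapse of underscore runs
def pvSquash : List Char → List Char
  | [] => []
  | a :: t => if a = '_' ∧ t.head? = some '_' then pvSquash t else a :: pvSquash t


def pvMapA (c : Char) : Char := if pvSafeStr.toList.contains c then c else '_'

set_option maxRecDepth 8192 in
theorem pvContains_eq (c : Char) : pvSafeSet.contains c = pvSafeStr.toList.contains c := by
  rfl

theorem pvHead?_squash (t : List Char) : (pvSquash t).head? = t.head? := by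
  induction t with
  | nil => rfl
  | cons a t ih =>
    rw [pvSquash]
    split
    · rename_i hc
      rw [ih, hc.2, ← hc.1]
      rfl
    · rfl

theorem pvSquash_cons_congr (a : Char) (u v : List Char) (h : pvSquash u = pvSquash v) :
    pvSquash (a :: u) = pvSquash (a :: v) := by
  have hh : u.head? = v.head? := by rw [← pvHead?_squash u, ← pvHead?_squash v, h]
  rw [pvSquash, pvSquash, hh]
  split
  · exact h
  · rw [h]

theorem pvSquash_rep1 (t : List Char) : pvSquash (pvRep1 t) = pvSquash t := by
  induction t using pvRep1.induct with
  | case1 t ih =>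
    rw [show pvRep1 ('_'::'_'::t) = '_' :: pvRep1 t from by rw [pvRep1]]
    rw [show pvSquash ('_'::'_'::t) = pvSquash ('_'::t) from by rw [pvSquash]; simp]
    exact pvSquash_cons_congr '_' (pvRep1 t) t ih
  | case2 c t hne ih =>
    rw [show pvRep1 (c::t) = c :: pvRep1 t from by
      rw [pvRep1.eq_def]
      split
      · rename_i t1 heq; exfalso; injection heq with e1 e2; exact hne t1 e1 e2
      · rename_i heq; injection heq with e1 e2; rw [e1, e2]
      · simp_all]
    exact pvSquash_cons_congr c (pvRep1 t) t ih
  | case3 => rfl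

theorem pvSquash_self (t : List Char) (h : ¬ (['_', '_'] <:+: t)) : pvSquash t = t := by
  induction t with
  | nil => rfl
  | cons a t ih =>
    rw [pvSquash]
    split
    · rename_i hc
      exfalso
      apply h
      cases t with
      | nil => simp at hc
      | cons b t2 =>
        simp at hc
        rw [hc.1, hc.2]
        exact ⟨[], t2, rfl⟩
    · rw [ih (fun hi => h (List.infix_cons_iff.mpr (Or.inr hi)))]

theorem pvCollapse_eq (s : String) : pvCollapse s = String.ofList (pvSquash s.toList) := by
  induction s using pvCollapse.induct with
  | case1 s h ih =>
    rw [pvCollapse, dif_pos h, ih]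
    have hb : (PySem.Str.replace s "__" "_").toList = pvRep1 s.toList := by
      have : (PySem.Str.replace s "__" "_").toList = PySem.Chars.replace s.toList "__".toList "_".toList := by
        simp [PySem.Str.toList_replace]
      rw [this, show ("__" : String).toList = ['_','_'] from by decide,
          show ("_" : String).toList = ['_'] from by decide, pvReplace_eq_rep1]
    rw [hb, pvSquash_rep1]
  | case2 s h =>
    rw [pvCollapse, dif_neg h]
    have hni : ¬ (['_', '_'] <:+: s.toList) := by
      intro hi
      apply h
      exact (PySem.Str.isIn_iff_infix (sub := "__") (s := s)).mpr (by simpa using hi)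
    rw [pvSquash_self _ hni]
    simp [String.ofList]

theorem pvBLoop_eq (cs : List Char) :
    pvBLoop cs false = pvSquash (cs.map pvMapA) ∧
    '_' :: pvBLoop cs true = pvSquash ('_' :: cs.map pvMapA) := by
  induction cs with
  | nil => constructor <;> rfl
  | cons c t ih =>
    have hd : (if pvSafeSet.contains c then c else '_') = pvMapA c := by
      rw [pvContains_eq]; rfl
    by_cases hu : pvMapA c = '_'
    · constructor
      · rw [pvBLoop]
        simp only [hd, hu, Bool.false_eq_true, if_false]
        rw [List.map_cons, hu]
        exact ih.2
      · rw [pvBLoop]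
        simp only [hd, hu]
        rw [List.map_cons, hu]
        rw [show pvSquash ('_'::'_'::t.map pvMapA) = pvSquash ('_'::t.map pvMapA) from by
          rw [pvSquash]; simp]
        exact ih.2
    · have hsq : ∀ m, pvSquash (pvMapA c :: m) = pvMapA c :: pvSquash m := by
        intro m
        rw [pvSquash]
        split
        · rename_i hc; exact absurd hc.1 hu
        · rfl
      constructor
      · rw [pvBLoop]
        simp only [hd, if_neg hu]
        rw [List.map_cons, hsq, ih.1]
      · rw [pvBLoop]
        simp only [hd, if_neg hu]
        rw [List.map_cons]
        rw [show pvSquash ('_' :: pvMapA c :: t.map pvMapA) = '_' :: pvSquash (pvMapA c :: t.map pvMapA) from by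
          rw [pvSquash]; simp [hu]]
        rw [hsq, ih.1]

theorem pvJoin_eq (cs : List Char) :
    (PySem.Str.join "" (cs.map (fun c => if pvSafeStr.toList.contains c then String.ofList [c] else "_"))).toList
      = cs.map pvMapA := by
  have h1 : (cs.map (fun c => if pvSafeStr.toList.contains c then String.ofList [c] else "_")).map String.toList
      = (cs.map pvMapA).map (fun c => [c]) := by
    rw [List.map_map, List.map_map]
    apply List.map_congr_left
    intro c _
    by_cases h : pvSafeStr.toList.contains c = true
    · simp only [Function.comp_apply, pvMapA, h, if_true]
      simp
    · simp only [Function.comp_apply, pvMapA, h, Bool.false_eq_true, if_false]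
      decide
  rw [PySem.Str.toList_join]
  rw [show ("" : String).toList = [] from rfl]
  rw [h1, PySem.Chars.join_nil_singletons]

theorem pvKey (s : String) :
    pvGetSafeFilename s = PySem.Str.stripChars (String.ofList (pvBLoop s.toList false)) "_" := by
  show PySem.Str.stripChars (pvCollapse (PySem.Str.join "" (s.toList.map
      (fun c => if pvSafeStr.toList.contains c then String.ofList [c] else "_")))) "_" = _
  rw [pvCollapse_eq]
  have h2 : pvSquash (PySem.Str.join "" (s.toList.map
      (fun c => if pvSafeStr.toList.contains c then String.ofList [c] else "_"))).toList
      = pvBLoop s.toList false := by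
    rw [pvJoin_eq, (pvBLoop_eq s.toList).1]
  rw [h2]

-- ===== VERDICT (by name: the statement is the Claim_ definition above) =====
theorem clean_product_name_spec : Claim_equal_clean_product_name := by
  intro title _
  unfold Spec_clean_product_name clean_product_name clean_product_name_alt
  simp only [pvKey]
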